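-- pv_equiv track=rewrite | github.com/ericmjl/Influenza-RNA-Secondary-Structure-Prediction | SequenceCleanup.py | GetStartingGapLength
-- ===== SOURCE A (Python) =====
-- def GetStartingGapLength(sequence):
-- 	"""
-- 	This function takes in a sequence, and counts from the beginning how many
-- 	gaps exist at the beginning of that sequence, up till the first ATG (start
-- 	codon).
--
-- 	Parameters:
-- 	- sequence: a string along which you wish to count the number of gaps
-- 	"""
-- 	gaps = 0
-- 	for i, position in enumerate(sequence):
-- 		if sequence[i:i+3] == 'ATG':
-- 			break
-- 		elif sequence[i] == '-':
-- 			gaps += 1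
-- 		else:
-- 			pass
--
-- 	return gaps
-- ===== SOURCE B (Python) =====
-- def GetStartingGapLength(sequence):
--     """Locate the first ATG with str.find, then count dashes in the prefix before it."""
--     idx = sequence.find('ATG')
--     prefix = sequence if idx == -1 else sequence[:idx]
--     return prefix.count('-')
-- ===== Notes on version B (the rewrite author's own statement) =====
-- stated objective: idiomatic
-- what changed: Replaces the hand-written enumerate loop that simultaneously slices for the start codon and counts gap characters with a locate-then-count decomposition: str.find then str.count on the prefix (whole string when absent); the two built-in passes run in C, giving a large constant-factor speedup over the per-character Python loop.
import Mathlib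
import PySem

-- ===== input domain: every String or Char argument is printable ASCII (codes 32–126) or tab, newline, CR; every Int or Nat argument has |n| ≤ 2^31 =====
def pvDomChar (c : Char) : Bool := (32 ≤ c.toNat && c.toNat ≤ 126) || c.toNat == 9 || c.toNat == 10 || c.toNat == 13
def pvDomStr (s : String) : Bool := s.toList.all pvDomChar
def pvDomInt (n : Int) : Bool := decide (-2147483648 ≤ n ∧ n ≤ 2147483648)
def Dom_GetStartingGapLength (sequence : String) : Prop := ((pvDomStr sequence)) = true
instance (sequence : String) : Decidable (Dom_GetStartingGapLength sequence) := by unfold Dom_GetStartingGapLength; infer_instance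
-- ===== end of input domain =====

-- B replaces A's single hand-written scan (detect ATG and count dashes in one loop) by the
-- idiomatic locate-then-count decomposition: find('ATG'), then count('-') on the prefix.

-- ===== PORT A =====
-- A's for-loop over enumerate(sequence) with break, carried as a recursion over the remaining
-- suffix with the accumulator `gaps`; `sequence[i:i+3]` at position i is `take 3` of the suffix
-- (PySem.List.slice_natCast_add), `sequence[i]` is its head.
def GetStartingGapLength.loop (gaps : Int) : List Char → Int
  | [] => gaps
  | c :: rest =>
      if List.take 3 (c :: rest) = ['A', 'T', 'G'] then gaps      -- break
      else if c = '-' then GetStartingGapLength.loop (gaps + 1) rest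
      else GetStartingGapLength.loop gaps rest                    -- pass

def GetStartingGapLength (sequence : String) : Int :=
  GetStartingGapLength.loop 0 sequence.toList

-- ===== PORT B =====
def GetStartingGapLength_alt (sequence : String) : Int :=
  let idx := PySem.Str.find sequence "ATG"
  let pre := if idx = -1 then sequence else PySem.Str.slice sequence none (some idx)
  (PySem.Str.count pre "-" : Int)

-- ===== PRECONDITION & SPEC =====
def Spec_GetStartingGapLength (sequence : String) (out : Int) : Prop := out = GetStartingGapLength_alt sequence
instance (sequence : String) (out : Int) : Decidable (Spec_GetStartingGapLength sequence out) := by unfold Spec_GetStartingGapLength; infer_instance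

-- ===== CLAIM (what is proved, stated in full; the proofs are below) =====
def Claim_equal_GetStartingGapLength : Prop := ∀ (sequence : String), Dom_GetStartingGapLength sequence → Spec_GetStartingGapLength sequence (GetStartingGapLength sequence)

-- ===== LEMMAS AND PROOFS =====

-- Python's str.count with a single-character needle is List.count.
theorem pv_count_go_singleton (c : Char) (fuel : Nat) :
    ∀ (l : List Char) (acc : Nat), l.length ≤ fuel →
      PySem.Chars.count.go [c] fuel l acc = acc + l.count c := by
  induction fuel with
  | zero =>
    intro l acc h
    cases l with
    | nil => simp [PySem.Chars.count.go]
    | cons x t => simp at h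
  | succ n ih =>
    intro l acc h
    cases l with
    | nil => simp [PySem.Chars.count.go]
    | cons x t =>
      simp only [PySem.Chars.count.go]
      by_cases hx : x = c
      · subst hx
        simp only [List.isPrefixOf, BEq.rfl, Bool.true_and, if_pos]
        rw [show List.drop (List.length [x]) (x :: t) = t by simp]
        rw [ih t (acc + 1) (by simpa using h)]
        simp
        omega
      · have hpre : ([c].isPrefixOf (x :: t)) = false := by
          simp [List.isPrefixOf]
          exact fun hb => hx hb.symm
        rw [hpre]
        simp only [Bool.false_eq_true, if_false]
        rw [ih t acc (by simpa using Nat.le_of_succ_le_succ (by simpa using h))]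
        simp [hx]

theorem pv_count_singleton (c : Char) (l : List Char) :
    PySem.Chars.count l [c] = l.count c := by
  unfold PySem.Chars.count
  simp only [List.isEmpty_cons, Bool.false_eq_true, if_false]
  simpa using pv_count_go_singleton c l.length l 0 (le_refl _)

-- Shifting the running index of find.go.
theorem pv_find_go_shift (sub : List Char) (hs : sub ≠ []) :
    ∀ (l : List Char) (k : Nat),
      PySem.Chars.find.go sub l (k + 1) =
        if PySem.Chars.find.go sub l k = -1 then -1 else PySem.Chars.find.go sub l k + 1 := by
  intro l
  induction l with
  | nil =>
    intro k
    have : sub.isEmpty = false := by simpa using hs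
    simp [PySem.Chars.find.go, this]
  | cons x t ih =>
    intro k
    simp only [PySem.Chars.find.go]
    by_cases hp : sub.isPrefixOf (x :: t) = true
    · simp only [hp, if_pos]
      have : ((k : Int)) ≠ -1 := by omega
      simp [this]
    · simp only [Bool.not_eq_true] at hp
      simp only [hp, Bool.false_eq_true, if_false]
      exact ih (k + 1)

-- find on a cons whose head does not start the needle.
theorem pv_find_cons (sub : List Char) (hs : sub ≠ []) (x : Char) (t : List Char)
    (hp : ¬ sub <+: (x :: t)) :
    PySem.Chars.find (x :: t) sub =
      if PySem.Chars.find t sub = -1 then -1 else PySem.Chars.find t sub + 1 := by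
  unfold PySem.Chars.find
  simp only [PySem.Chars.find.go]
  have hb : sub.isPrefixOf (x :: t) = false := by
    rw [Bool.eq_false_iff]
    intro hb
    exact hp (List.isPrefixOf_iff_prefix.mp hb)
  rw [hb]
  simp only [Bool.false_eq_true, if_false]
  exact pv_find_go_shift sub hs t 0

theorem pv_find_cons_prefix (sub : List Char) (x : Char) (t : List Char)
    (hp : sub <+: (x :: t)) :
    PySem.Chars.find (x :: t) sub = 0 := by
  unfold PySem.Chars.find
  simp only [PySem.Chars.find.go]
  rw [if_pos (List.isPrefixOf_iff_prefix.mpr hp)]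
  simp

-- Core equivalence on the character list: A's one-pass loop equals
-- "count dashes in the prefix before the first ATG (whole list when absent)".
theorem pv_loop_eq (l : List Char) :
    ∀ (g : Int),
      GetStartingGapLength.loop g l =
        g + ((if PySem.Chars.find l ['A', 'T', 'G'] = -1 then l
              else l.take (PySem.Chars.find l ['A', 'T', 'G']).toNat).count '-' : Int) := by
  induction l with
  | nil =>
    intro g
    simp [GetStartingGapLength.loop, PySem.Chars.find, PySem.Chars.find.go]
  | cons x t ih =>
    intro g
    show (if List.take 3 (x :: t) = ['A', 'T', 'G'] then g
          else if x = '-' then GetStartingGapLength.loop (g + 1) t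
          else GetStartingGapLength.loop g t) = _
    by_cases hpre : ['A', 'T', 'G'] <+: (x :: t)
    · have htake : List.take 3 (x :: t) = ['A', 'T', 'G'] := by
        obtain ⟨r, hr⟩ := hpre
        rw [← hr]; simp
      rw [if_pos htake, pv_find_cons_prefix _ x t hpre]
      simp
    · have htake : List.take 3 (x :: t) ≠ ['A', 'T', 'G'] := by
        intro hEq
        exact hpre ⟨List.drop 3 (x :: t), by rw [← hEq]; simp⟩
      rw [if_neg htake]
      have hf := pv_find_cons ['A', 'T', 'G'] (by simp) x t hpre
      by_cases ht : PySem.Chars.find t ['A', 'T', 'G'] = -1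
      · rw [ht, if_pos rfl] at hf
        rw [show (if PySem.Chars.find (x :: t) ['A', 'T', 'G'] = -1 then x :: t
              else (x :: t).take (PySem.Chars.find (x :: t) ['A', 'T', 'G']).toNat) = x :: t by
          rw [hf]; simp]
        by_cases hx : x = '-'
        · rw [if_pos hx, ih (g + 1), ht]
          simp [hx]
          omega
        · rw [if_neg hx, ih g, ht]
          simp [hx]
      · rw [if_neg ht] at hf
        have hnn : 0 ≤ PySem.Chars.find t ['A', 'T', 'G'] := by
          have := PySem.Chars.neg_one_le_find t ['A', 'T', 'G']
          omega
        have hcons_ne : PySem.Chars.find (x :: t) ['A', 'T', 'G'] ≠ -1 := by omega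
        have htoNat : (PySem.Chars.find (x :: t) ['A', 'T', 'G']).toNat
            = (PySem.Chars.find t ['A', 'T', 'G']).toNat + 1 := by omega
        rw [show (if PySem.Chars.find (x :: t) ['A', 'T', 'G'] = -1 then x :: t
              else (x :: t).take (PySem.Chars.find (x :: t) ['A', 'T', 'G']).toNat)
            = x :: t.take (PySem.Chars.find t ['A', 'T', 'G']).toNat by
          rw [if_neg hcons_ne, htoNat]; simp]
        by_cases hx : x = '-'
        · rw [if_pos hx, ih (g + 1), if_neg ht]
          simp [hx]
          omega
        · rw [if_neg hx, ih g, if_neg ht]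
          simp [hx]

-- B's port rewritten to the same prefix-count expression on the character list.
theorem pv_alt_eq (s : String) :
    GetStartingGapLength_alt s =
      ((if PySem.Chars.find s.toList ['A', 'T', 'G'] = -1 then s.toList
        else s.toList.take (PySem.Chars.find s.toList ['A', 'T', 'G']).toNat).count '-' : Int) := by
  unfold GetStartingGapLength_alt
  simp only []
  rw [show PySem.Str.find s "ATG" = PySem.Chars.find s.toList ['A', 'T', 'G'] from
    PySem.Str.find_eq s "ATG"]
  by_cases hf : PySem.Chars.find s.toList ['A', 'T', 'G'] = -1
  · rw [if_pos hf, if_pos hf, PySem.Str.count_eq,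
      show ("-" : String).toList = ['-'] from rfl, pv_count_singleton]
  · have hnn : 0 ≤ PySem.Chars.find s.toList ['A', 'T', 'G'] := by
      have := PySem.Chars.neg_one_le_find s.toList ['A', 'T', 'G']
      omega
    rw [if_neg hf, if_neg hf, PySem.Str.count_eq,
      show ("-" : String).toList = ['-'] from rfl, pv_count_singleton,
      PySem.Str.toList_slice, PySem.Chars.slice_eq_listSlice, PySem.List.slice_to _ hnn]

-- ===== VERDICT (by name: the statement is the Claim_ definition above) =====
theorem GetStartingGapLength_spec : Claim_equal_GetStartingGapLength := by
  intro s _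
  unfold Spec_GetStartingGapLength GetStartingGapLength
  rw [pv_loop_eq s.toList 0, zero_add, pv_alt_eq]
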